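-- pv_equiv track=rewrite | github.com/lixumin-zai/latex_normalizer | xizi_latex_normalizer/utils/common_utils.py | split_to_latex_and_not
-- ===== SOURCE A (Python) =====
-- def split_to_latex_and_not(sent: str):
--     start_idx, seg_list = 0, []
--     preceding_slash, in_formula = False, False
--
--     for idx, char in enumerate(sent):
--         if char == "\\":
--             preceding_slash = True
--         elif char == "$":
--             if preceding_slash:
--                 preceding_slash = False
--                 continue
--
--             in_formula = not in_formula
--             if in_formula:
--                 seg_list.append(sent[start_idx: idx])
--                 start_idx = idx
--             else:
--                 seg_list.append(sent[start_idx + 1: idx])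
--                 start_idx = idx + 1
--         else:
--             preceding_slash = False
--
--     seg_list.append(sent[start_idx:])
--
--     return seg_list
-- ===== SOURCE B (Python) =====
-- def split_to_latex_and_not(sent: str):
--     # Collect positions of unescaped '$' (previous char not a backslash), then
--     # walk them in open/close pairs to emit segments.
--     pos = [i for i, c in enumerate(sent) if c == "$" and (i == 0 or sent[i - 1] != "\\")]
--     seg_list = []
--     prev = 0
--     for k in range(0, len(pos) - 1, 2):
--         o, c = pos[k], pos[k + 1]
--         seg_list.append(sent[prev:o])
--         seg_list.append(sent[o + 1:c])
--         prev = c + 1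
--     if len(pos) % 2 == 1:
--         o = pos[-1]
--         seg_list.append(sent[prev:o])
--         seg_list.append(sent[o:])
--     else:
--         seg_list.append(sent[prev:])
--     return seg_list
-- ===== Notes on version B (the rewrite author's own statement) =====
-- stated objective: alternative
-- what changed: Replaces the single stateful character scan (slash/in_formula flags updated per char) by a two-phase algorithm: first collect the positions of all unescaped dollar delimiters with a comprehension, then walk those positions in open/close pairs to emit the segments, with an explicit odd-count tail case.
import Mathlib
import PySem

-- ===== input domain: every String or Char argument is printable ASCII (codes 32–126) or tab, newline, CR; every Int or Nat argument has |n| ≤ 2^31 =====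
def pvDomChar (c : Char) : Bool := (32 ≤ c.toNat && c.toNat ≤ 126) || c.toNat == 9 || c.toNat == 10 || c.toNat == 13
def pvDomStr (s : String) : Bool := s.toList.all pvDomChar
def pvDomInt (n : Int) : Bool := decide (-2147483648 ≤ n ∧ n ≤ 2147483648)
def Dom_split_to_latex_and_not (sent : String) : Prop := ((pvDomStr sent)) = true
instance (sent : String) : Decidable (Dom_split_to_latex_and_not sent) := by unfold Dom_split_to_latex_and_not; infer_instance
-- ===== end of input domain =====

-- B replaces A's single stateful character scan by a two-phase algorithm (collect
-- unescaped-dollar positions, then walk them in open/close pairs); alternative, same cost.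

-- ===== PORT A =====
-- state = (start_idx, seg_list, preceding_slash, in_formula)
def aStep (cs : List Char) (st : Int × List (List Char) × Bool × Bool) (ic : Int × Char) :
    Int × List (List Char) × Bool × Bool :=
  let (start_idx, seg_list, preceding_slash, in_formula) := st
  let (idx, ch) := ic
  if ch = '\\' then (start_idx, seg_list, true, in_formula)
  else if ch = '$' then
    if preceding_slash then (start_idx, seg_list, false, in_formula)   -- continue
    else if !in_formula then                                           -- in_formula becomes true
      (idx, seg_list ++ [PySem.List.slice cs (some start_idx) (some idx)], false, true)
    else
      (idx + 1, seg_list ++ [PySem.List.slice cs (some (start_idx + 1)) (some idx)], false, false)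
  else (start_idx, seg_list, false, in_formula)

def split_to_latex_and_not (sent : String) : List String :=
  let cs := sent.toList
  let st := (PySem.List.enumerate cs 0).foldl (aStep cs) (0, [], false, false)
  (st.2.1 ++ [PySem.List.slice cs (some st.1) none]).map (fun l => String.ofList l)

-- ===== PORT B =====
-- is this position an unescaped '$'?  (port of Source B's comprehension filter)
def bCond (cs : List Char) (ic : Int × Char) : Bool :=
  ic.2 == '$' && (ic.1 == 0 || PySem.List.pyGetD cs (ic.1 - 1) ' ' != '\\')

-- walk the delimiter positions in open/close pairs (port of Source B's step-2 loop + tail)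
def bWalk (cs : List Char) (ps : List Int) (prev : Int) : List (List Char) :=
  match ps with
  | o :: c :: rest =>
      PySem.List.slice cs (some prev) (some o) ::
      PySem.List.slice cs (some (o + 1)) (some c) :: bWalk cs rest (c + 1)
  | [o] =>
      PySem.List.slice cs (some prev) (some o) :: [PySem.List.slice cs (some o) none]
  | [] => [PySem.List.slice cs (some prev) none]

def split_to_latex_and_not_alt (sent : String) : List String :=
  let cs := sent.toList
  let pos := ((PySem.List.enumerate cs 0).filter (bCond cs)).map (·.1)
  (bWalk cs pos 0).map (fun l => String.ofList l)

-- ===== PRECONDITION & SPEC =====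
def Spec_split_to_latex_and_not (sent : String) (out : List String) : Prop := out = split_to_latex_and_not_alt sent
instance (sent : String) (out : List String) : Decidable (Spec_split_to_latex_and_not sent out) := by unfold Spec_split_to_latex_and_not; infer_instance

-- ===== CLAIM (what is proved, stated in full; the proofs are below) =====
def Claim_equal_split_to_latex_and_not : Prop := ∀ (sent : String), Dom_split_to_latex_and_not sent → Spec_split_to_latex_and_not sent (split_to_latex_and_not sent)

-- ===== LEMMAS AND PROOFS =====

-- single-step emitter: processes one delimiter at a time carrying the parity flag
def emit1 (cs : List Char) (ps : List Int) (prev : Int) (f : Bool) : List (List Char) :=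
  match ps, f with
  | [], _ => [PySem.List.slice cs (some prev) none]
  | p :: rest, false => PySem.List.slice cs (some prev) (some p) :: emit1 cs rest p true
  | p :: rest, true =>
      PySem.List.slice cs (some (prev + 1)) (some p) :: emit1 cs rest (p + 1) false

-- positions of unescaped '$' in suf, indexed from j, slash = previous char was '\'
def posA (cs : List Char) (j : Int) (slash : Bool) : List Int :=
  match cs with
  | [] => []
  | ch :: rest =>
      (if ch = '$' ∧ slash = false then [j] else []) ++ posA rest (j + 1) (ch = '\\')

lemma bWalk_eq_emit1 (cs : List Char) (ps : List Int) (prev : Int) :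
    bWalk cs ps prev = emit1 cs ps prev false := by
  induction ps, prev using bWalk.induct with
  | case1 o c rest prev ih => simp [bWalk, emit1, ih]
  | case2 o prev => simp [bWalk, emit1]
  | case3 prev => simp [bWalk, emit1]

lemma bCond_head (q : List Char) (y ch : Char) (rest : List Char) :
    bCond ((q ++ [y]) ++ ch :: rest) (((q ++ [y]).length : Int), ch)
      = ((ch == '$') && !(decide (y = '\\'))) := by
  have hidx : (((q ++ [y]).length : Int)) - 1 = ((q.length : Nat) : Int) := by
    simp
  have hzero : ((((q ++ [y]).length : Int)) == 0) = false := by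
    simp; omega
  simp only [bCond, hzero, hidx, PySem.List.pyGetD_natCast, Bool.false_or]
  have hget : ((q ++ [y]) ++ ch :: rest).getD q.length ' ' = y := by
    simp [List.getD, List.append_assoc]
  rw [hget]
  by_cases h : y = '\\' <;> simp [h]

lemma posFilter (suf : List Char) : ∀ (pre : List Char),
    ((PySem.List.enumerate suf (pre.length : Int)).filter (bCond (pre ++ suf))).map (·.1)
      = posA suf (pre.length : Int) (decide (pre.getLast? = some '\\')) := by
  induction suf with
  | nil => intro pre; simp [posA, PySem.List.enumerate_nil]
  | cons ch rest ih =>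
    intro pre
    rw [PySem.List.enumerate_cons, List.filter_cons]
    have hcond : bCond (pre ++ ch :: rest) ((pre.length : Int), ch)
        = ((ch == '$') && !(decide (pre.getLast? = some '\\'))) := by
      rcases pre.eq_nil_or_concat with rfl | ⟨q, y, hq⟩
      · simp [bCond]
      · subst hq
        rw [List.concat_eq_append, bCond_head]
        simp
    have ih' := ih (pre ++ [ch])
    have hlen : (((pre ++ [ch]).length : Nat) : Int) = (pre.length : Int) + 1 := by
      simp
    rw [hlen, List.append_assoc, List.singleton_append, List.getLast?_concat] at ih'
    have hdec : (decide (some ch = some '\\') : Bool) = decide (ch = '\\') := by simp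
    rw [hdec] at ih'
    rw [hcond]
    by_cases hch : ch = '$'
    · subst hch
      by_cases hsl : (decide (pre.getLast? = some '\\') : Bool) = true
      · rw [hsl]
        simp only [Bool.not_true, Bool.and_false, Bool.false_eq_true, if_false]
        rw [ih']
        simp [posA]
      · have hsl' : (decide (pre.getLast? = some '\\') : Bool) = false := by
          cases h : (decide (pre.getLast? = some '\\') : Bool) <;> simp_all
        rw [hsl']
        simp only [Bool.not_false, Bool.and_true, beq_self_eq_true, if_true, List.map_cons]
        rw [ih']
        simp [posA]
    · have : ((ch == '$') && !(decide (pre.getLast? = some '\\'))) = false := by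
        simp [hch]
      rw [this]
      simp only [Bool.false_eq_true, if_false]
      rw [ih']
      simp [posA, hch]

lemma aLoop_eq (cs : List Char) :
    ∀ (suf : List Char) (j start : Int) (segs : List (List Char)) (slash f : Bool),
    (let st := (PySem.List.enumerate suf j).foldl (aStep cs) (start, segs, slash, f)
     st.2.1 ++ [PySem.List.slice cs (some st.1) none])
      = segs ++ emit1 cs (posA suf j slash) start f := by
  intro suf
  induction suf with
  | nil => intro j start segs slash f; simp [posA, emit1, PySem.List.enumerate_nil]
  | cons ch rest ih =>
    intro j start segs slash f
    have hds : ¬ (('$' : Char) = '\\') := by decide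
    rw [PySem.List.enumerate_cons, List.foldl_cons]
    by_cases h1 : ch = '\\'
    · subst h1
      simp only [aStep]
      rw [ih]
      simp [posA]
    · by_cases h2 : ch = '$'
      · subst h2
        by_cases h3 : slash = true
        · subst h3
          simp only [aStep, if_neg hds]
          rw [ih]
          simp [posA]
        · have h3' : slash = false := by cases slash <;> simp_all
          subst h3'
          cases f with
          | false =>
            simp only [aStep, if_neg hds, if_neg Bool.false_ne_true, Bool.not_false]
            rw [ih]
            simp [posA, emit1]
          | true =>
            simp only [aStep, if_neg hds, Bool.not_true, if_neg Bool.false_ne_true]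
            rw [ih]
            simp [posA, emit1]
      · simp only [aStep, if_neg h1, if_neg h2]
        rw [ih]
        simp [posA, h1, h2]

-- ===== VERDICT (by name: the statement is the Claim_ definition above) =====
theorem split_to_latex_and_not_spec : Claim_equal_split_to_latex_and_not := by
  intro sent _
  unfold Spec_split_to_latex_and_not split_to_latex_and_not split_to_latex_and_not_alt
  dsimp only
  have hP : ((PySem.List.enumerate sent.toList 0).filter (bCond sent.toList)).map (·.1)
      = posA sent.toList 0 false := by
    have h := posFilter sent.toList []
    simpa using h
  have hA := aLoop_eq sent.toList sent.toList 0 0 [] false false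
  simp only [List.nil_append] at hA
  rw [bWalk_eq_emit1, hP, ← hA]
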